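-- pv_equiv track=rewrite | github.com/Ciel15/Collatz | n=.py | trace_backward
-- ===== SOURCE A (Python) =====
-- def reverse_T(target, max_k=40):
--     results = []
--     for k in range(1, max_k + 1):
--         candidate = target * (2 ** k) - 1
--         if candidate % 3 == 0:
--             n = candidate // 3
--             if n % 2 == 1 and n > 0:
--                 results.append(n)
--     return results
--
-- def trace_backward(target, depth, max_k=40):
--     def helper(n, d):
--         if d == 0:
--             return [[n]]
--         branches = reverse_T(n, max_k)
--         paths = []
--         for prev in branches:
--             for path in helper(prev, d - 1):
--                 paths.append(path + [n])
--         return paths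
--     return helper(target, depth)
-- ===== SOURCE B (Python) =====
-- def reverse_T(target, max_k=40):
--     results = []
--     for k in range(1, max_k + 1):
--         candidate = target * (2 ** k) - 1
--         if candidate % 3 == 0:
--             n = candidate // 3
--             if n % 2 == 1 and n > 0:
--                 results.append(n)
--     return results
--
-- def trace_backward(target, depth, max_k=40):
--     paths = [[target]]
--     for _ in range(depth):
--         if not paths:
--             break
--         new_paths = []
--         for p in paths:
--             for prev in reverse_T(p[0], max_k):
--                 new_paths.append([prev] + p)
--         paths = new_paths
--     return paths
-- ===== Notes on version B (the rewrite author's own statement) =====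
-- stated objective: alternative
-- what changed: Replaces A's nested recursion (helper recursing per branch, appending the node at the path's end) with an iterative level-by-level frontier expansion from [[target]] that prepends each reverse_T predecessor of a path's head and stops early on an empty frontier; Pre_ excludes negative depth, on which A recurses without bound whenever a backward branch exists and otherwise returns an accidental [], and depth > 900, where A's recursion depth equals depth and overruns CPython's recursion limit (RecursionError) whenever a backward chain survives.
-- outside the precondition, e.g. on trace_backward(-1, -1, 40): A returns [], B returns [[-1]]; on trace_backward(-1, 901, 40): A returns [], B returns []
import Mathlib
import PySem

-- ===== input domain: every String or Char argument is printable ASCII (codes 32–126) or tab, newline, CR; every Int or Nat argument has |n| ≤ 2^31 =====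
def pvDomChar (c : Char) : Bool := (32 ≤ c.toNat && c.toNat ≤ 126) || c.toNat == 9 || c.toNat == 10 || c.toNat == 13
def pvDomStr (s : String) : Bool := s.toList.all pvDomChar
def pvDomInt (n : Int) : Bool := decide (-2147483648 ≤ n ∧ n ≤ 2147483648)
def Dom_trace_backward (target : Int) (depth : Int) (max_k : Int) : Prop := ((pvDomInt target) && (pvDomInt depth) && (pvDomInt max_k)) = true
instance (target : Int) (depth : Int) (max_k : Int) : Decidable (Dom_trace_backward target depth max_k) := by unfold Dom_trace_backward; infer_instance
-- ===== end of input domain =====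

-- B rewrites A's recursive backward trace as an iterative level-by-level frontier expansion (alternative decomposition, same cost).

-- ===== PORT A =====
-- shared module helper reverse_T (identical in Source A and Source B); k ∈ range(1, max_k+1) so k ≥ 1 and 2**k = 2 ^ k.toNat exactly
def pvReverseT (target : Int) (max_k : Int) : List Int :=
  (PySem.List.pyRange 1 (max_k + 1) 1).foldl (fun results k =>
    let candidate := target * 2 ^ k.toNat - 1
    if PySem.Int.mod candidate 3 = 0 then
      let n := PySem.Int.floordiv candidate 3
      if PySem.Int.mod n 2 = 1 ∧ 0 < n then results ++ [n] else results
    else results) []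

-- A's inner helper; the depth counter is Nat fuel (Pre_ restricts to depth ≥ 0, where Python's d hits 0 exactly)
def pvHelperA (max_k : Int) (n : Int) : Nat → List (List Int)
  | 0 => [[n]]
  | d + 1 =>
    (pvReverseT n max_k).foldl (fun paths prev =>
      (pvHelperA max_k prev d).foldl (fun ps path => ps ++ [path ++ [n]]) paths) []

def trace_backward (target : Int) (depth : Int) (max_k : Int) : List (List Int) :=
  pvHelperA max_k target depth.toNat

-- ===== PORT B =====
-- Source B's 'for _ in range(depth)' loop with its 'if not paths: break', as fuel recursion;
-- p[0] is ported as p.headI: every path in the loop is nonempty (built from [target] by prepending)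
def pvLoopB (max_k : Int) : Nat → List (List Int) → List (List Int)
  | 0, paths => paths
  | d + 1, paths =>
    if paths = [] then paths
    else
      pvLoopB max_k d
        (paths.foldl (fun new_paths p =>
          (pvReverseT p.headI max_k).foldl (fun nps prev => nps ++ [prev :: p]) new_paths) [])

def trace_backward_alt (target : Int) (depth : Int) (max_k : Int) : List (List Int) :=
  pvLoopB max_k depth.toNat [[target]]

-- ===== PRECONDITION & SPEC =====
-- Pre_ excludes negative depth, on which A recurses without bound whenever a backward branch exists
-- and otherwise returns an accidental [], and depth > 900, where A's recursion depth equals depth and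
-- overruns CPython's recursion limit (RecursionError) whenever a backward chain survives.
def Pre_trace_backward (target : Int) (depth : Int) (max_k : Int) : Prop := 0 ≤ depth ∧ depth ≤ 900
instance (target : Int) (depth : Int) (max_k : Int) : Decidable (Pre_trace_backward target depth max_k) := by unfold Pre_trace_backward; infer_instance
def pvWitness_trace_backward : Int × Int × Int := (1, 2, 6)

def Spec_trace_backward (target : Int) (depth : Int) (max_k : Int) (out : List (List Int)) : Prop := out = trace_backward_alt target depth max_k
instance (target : Int) (depth : Int) (max_k : Int) (out : List (List Int)) : Decidable (Spec_trace_backward target depth max_k out) := by unfold Spec_trace_backward; infer_instance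

-- ===== CLAIM (what is proved, stated in full; the proofs are below) =====
def Claim_equal_trace_backward : Prop := ∀ (target : Int) (depth : Int) (max_k : Int), Dom_trace_backward target depth max_k → Pre_trace_backward target depth max_k → Spec_trace_backward target depth max_k (trace_backward target depth max_k)

-- ===== LEMMAS AND PROOFS =====

theorem pvHeadI_cons_tail (p : List Int) (h : p ≠ []) : p.headI :: p.tail = p := by
  cases p with
  | nil => exact absurd rfl h
  | cons a t => rfl

-- one level of B's loop, in closed form
def pvStepB (max_k : Int) (paths : List (List Int)) : List (List Int) :=
  paths.flatMap (fun p => (pvReverseT p.headI max_k).map (fun prev => prev :: p))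

theorem pvStepB_eq (max_k : Int) (paths : List (List Int)) :
    paths.foldl (fun new_paths p =>
      (pvReverseT p.headI max_k).foldl (fun nps prev => nps ++ [prev :: p]) new_paths) []
    = pvStepB max_k paths := by
  have h : ∀ (p : List Int) (acc : List (List Int)),
      (pvReverseT p.headI max_k).foldl (fun nps prev => nps ++ [prev :: p]) acc
        = acc ++ (pvReverseT p.headI max_k).map (fun prev => prev :: p) := by
    intro p acc
    exact PySem.List.foldl_append_singleton_eq_map _ _ _
  calc paths.foldl (fun new_paths p =>
          (pvReverseT p.headI max_k).foldl (fun nps prev => nps ++ [prev :: p]) new_paths) []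
      = paths.foldl (fun new_paths p =>
          new_paths ++ (pvReverseT p.headI max_k).map (fun prev => prev :: p)) [] := by
        rw [funext fun acc => funext fun x => h x acc]
    _ = pvStepB max_k paths := PySem.List.foldl_append_eq_flatMap _ _ _

theorem pvHelperA_succ (max_k n : Int) (d : Nat) :
    pvHelperA max_k n (d + 1)
      = (pvReverseT n max_k).flatMap (fun prev => (pvHelperA max_k prev d).map (fun path => path ++ [n])) := by
  show (pvReverseT n max_k).foldl (fun paths prev =>
      (pvHelperA max_k prev d).foldl (fun ps path => ps ++ [path ++ [n]]) paths) [] = _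
  calc (pvReverseT n max_k).foldl (fun paths prev =>
          (pvHelperA max_k prev d).foldl (fun ps path => ps ++ [path ++ [n]]) paths) []
      = (pvReverseT n max_k).foldl (fun paths prev =>
          paths ++ (pvHelperA max_k prev d).map (fun path => path ++ [n])) [] := by
        rw [funext fun acc => funext fun x =>
          (PySem.List.foldl_append_singleton_eq_map (fun path => path ++ [n]) (pvHelperA max_k x d) acc : _)]
    _ = _ := PySem.List.foldl_append_eq_flatMap _ _ _

theorem pvStepB_nil (max_k : Int) : pvStepB max_k [] = [] := rfl

theorem pvIter_nil (max_k : Int) (n : Nat) : (pvStepB max_k)^[n] [] = [] := by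
  induction n with
  | zero => rfl
  | succ m ih => rw [Function.iterate_succ_apply, pvStepB_nil, ih]

theorem pvLoopB_eq_iterate (max_k : Int) (d : Nat) (ps : List (List Int)) :
    pvLoopB max_k d ps = (pvStepB max_k)^[d] ps := by
  induction d generalizing ps with
  | zero => rfl
  | succ m ih =>
      show (if ps = [] then ps else pvLoopB max_k m _) = _
      by_cases h : ps = []
      · rw [if_pos h, h, pvIter_nil]
      · rw [if_neg h, ih, pvStepB_eq, Function.iterate_succ_apply]

-- the frontier invariant: d expansions of a list of nonempty paths
theorem pvIterStep (max_k : Int) (d : Nat) :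
    ∀ (ps : List (List Int)), (∀ p ∈ ps, p ≠ []) →
      (pvStepB max_k)^[d] ps
        = ps.flatMap (fun p => (pvHelperA max_k p.headI d).map (fun q => q ++ p.tail)) := by
  induction d with
  | zero =>
      intro ps hne
      simp only [Function.iterate_zero, id_eq, pvHelperA, List.map_cons, List.map_nil]
      have : ∀ p ∈ ps, [p.headI :: p.tail] = [p] := by
        intro p hp
        rw [pvHeadI_cons_tail p (hne p hp)]
      calc ps = ps.flatMap (fun p => [p]) := by simp
        _ = _ := by
            apply List.flatMap_congr
            intro p hp
            exact ((this p hp).symm : _)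
  | succ d ih =>
      intro ps hne
      rw [Function.iterate_succ_apply]
      have hstepne : ∀ p ∈ pvStepB max_k ps, p ≠ [] := by
        intro p hp
        simp only [pvStepB, List.mem_flatMap, List.mem_map] at hp
        obtain ⟨q, _, prev, _, hpq⟩ := hp
        simp [← hpq]
      rw [ih (pvStepB max_k ps) hstepne]
      simp only [pvStepB, List.flatMap_assoc]
      apply List.flatMap_congr
      intro p hp
      rw [pvHelperA_succ, List.map_flatMap, List.flatMap_map]
      apply List.flatMap_congr
      intro prev _
      simp only [List.headI_cons, List.tail_cons, List.map_map]
      apply List.map_congr_left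
      intro q _
      simp only [Function.comp_apply, List.append_assoc, List.singleton_append]
      rw [pvHeadI_cons_tail p (hne p hp)]

-- ===== VERDICT (by name: the statement is the Claim_ definition above) =====
theorem trace_backward_spec : Claim_equal_trace_backward := by
  intro target depth max_k _ _
  show trace_backward target depth max_k = trace_backward_alt target depth max_k
  unfold trace_backward trace_backward_alt
  rw [pvLoopB_eq_iterate, pvIterStep max_k depth.toNat [[target]] (by simp)]
  simp
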